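-- pv_equiv track=rewrite | github.com/yarmakdima-dev/jobpilot | agents/a0/research.py | _infer_sub_sector
-- ===== SOURCE A (Python) =====
-- from typing import Any
--
-- def _infer_sub_sector(profile: dict[str, Any]) -> str:
--     """Infer a narrower sub-sector when Gemini omitted it."""
--     text = " ".join(
--         str(part)
--         for part in (
--             ((profile.get("snapshot") or {}).get("company_description")),
--             ((profile.get("strategy_and_direction") or {}).get("mission_and_vision")),
--         )
--         if part
--     ).lower()
--     if "productivity" in text or "workspace" in text or "note-taking" in text:
--         return "Productivity SaaS"
--     if "project" in text or "knowledge" in text: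
--         return "Collaboration Software"
--     return "Software Tools"
-- ===== SOURCE B (Python) =====
-- _KEYWORD_PRIORITY = {
--     "productivity": 0, "workspace": 0, "note-taking": 0,
--     "project": 1, "knowledge": 1,
-- }
-- _CATEGORIES = ["Productivity SaaS", "Collaboration Software", "Software Tools"]
--
-- def _infer_sub_sector(profile):
--     """Infer sub-sector: scan each profile field separately, keeping the best
--     (lowest) priority of any matching keyword, then index the category table.
--
--     No keyword contains a space, so testing each field on its own is
--     equivalent to testing the space-joined text.
--     """
--     fields = (
--         (profile.get("snapshot") or {}).get("company_description"),
--         (profile.get("strategy_and_direction") or {}).get("mission_and_vision"),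
--     )
--     best = len(_CATEGORIES) - 1
--     for field in fields:
--         if not field:
--             continue
--         low = str(field).lower()
--         for kw, pri in _KEYWORD_PRIORITY.items():
--             if pri < best and kw in low:
--                 best = pri
--     return _CATEGORIES[best]
-- ===== Notes on version B (the rewrite author's own statement) =====
-- stated objective: alternative
-- what changed: Instead of building one space-joined lowercased text and running a first-match if/elif substring cascade, B never joins: it scans each profile field separately, folding a best-(lowest)-priority accumulator over a keyword-to-priority map, and returns the category table entry at that priority (correct because no keyword contains a space, so a keyword occurs in the joined text iff it occurs in some field).
import Mathlib
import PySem

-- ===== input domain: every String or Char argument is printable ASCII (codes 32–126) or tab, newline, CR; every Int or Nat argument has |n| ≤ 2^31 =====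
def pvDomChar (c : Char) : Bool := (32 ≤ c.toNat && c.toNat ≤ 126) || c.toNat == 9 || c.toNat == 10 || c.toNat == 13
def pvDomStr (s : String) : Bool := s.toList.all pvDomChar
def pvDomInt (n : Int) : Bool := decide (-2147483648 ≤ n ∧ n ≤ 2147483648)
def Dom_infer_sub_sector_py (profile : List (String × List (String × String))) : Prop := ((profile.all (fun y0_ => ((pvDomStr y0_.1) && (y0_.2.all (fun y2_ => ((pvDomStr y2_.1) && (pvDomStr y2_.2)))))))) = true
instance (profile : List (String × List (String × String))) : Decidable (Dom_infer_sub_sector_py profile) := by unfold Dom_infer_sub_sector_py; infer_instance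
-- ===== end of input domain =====

-- B replaces A's joined-text if/elif substring cascade by a per-field scan folding a
-- best-priority accumulator over a keyword→priority map, then indexes a category table
-- (objective: alternative decomposition; equivalent because no keyword contains a space).

-- ===== PORT A =====
def infer_sub_sector_py (profile : List (String × List (String × String))) : String :=
  -- (profile.get("snapshot") or {}).get("company_description"); '... or {}' maps both a missing
  -- key and a falsy (empty) dict to {} — the match below does exactly that
  let snap : List (String × String) :=
    match (PySem.Dict.mk profile).get? "snapshot" with
    | some d => if d = [] then [] else d
    | none => []
  let strat : List (String × String) :=
    match (PySem.Dict.mk profile).get? "strategy_and_direction" with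
    | some d => if d = [] then [] else d
    | none => []
  let p1 : Option String := (PySem.Dict.mk snap).get? "company_description"
  let p2 : Option String := (PySem.Dict.mk strat).get? "mission_and_vision"
  -- "str(part) for part in (p1, p2) if part": keep the truthy (non-None, non-empty) strings
  let parts : List String :=
    [p1, p2].filterMap (fun o => match o with
      | some s => if s = "" then none else some s
      | none => none)
  let text : String := PySem.Str.lower (PySem.Str.join " " parts)
  if PySem.Str.isIn "productivity" text || PySem.Str.isIn "workspace" text
      || PySem.Str.isIn "note-taking" text then
    "Productivity SaaS"
  else if PySem.Str.isIn "project" text || PySem.Str.isIn "knowledge" text then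
    "Collaboration Software"
  else
    "Software Tools"

-- ===== PORT B =====
-- Source B's _KEYWORD_PRIORITY dict (insertion order) and _CATEGORIES table
def pvKeywordPriority : List (String × Nat) :=
  [("productivity", 0), ("workspace", 0), ("note-taking", 0), ("project", 1), ("knowledge", 1)]
def pvCategories : List String := ["Productivity SaaS", "Collaboration Software", "Software Tools"]

def infer_sub_sector_py_alt (profile : List (String × List (String × String))) : String :=
  let snap : List (String × String) :=
    match (PySem.Dict.mk profile).get? "snapshot" with
    | some d => if d = [] then [] else d
    | none => []
  let strat : List (String × String) :=
    match (PySem.Dict.mk profile).get? "strategy_and_direction" with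
    | some d => if d = [] then [] else d
    | none => []
  let fields : List (Option String) :=
    [(PySem.Dict.mk snap).get? "company_description",
     (PySem.Dict.mk strat).get? "mission_and_vision"]
  -- for field in fields: if not field: continue; low = field.lower();
  --   for kw, pri in _KEYWORD_PRIORITY.items(): if pri < best and kw in low: best = pri
  let best : Nat :=
    fields.foldl (fun best f =>
      match f with
      | none => best
      | some s =>
        if s = "" then best
        else
          let low := PySem.Str.lower s
          pvKeywordPriority.foldl
            (fun best kp => if decide (kp.2 < best) && PySem.Str.isIn kp.1 low then kp.2 else best)
            best) (pvCategories.length - 1)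
  -- best < len(_CATEGORIES) always, so Python's _CATEGORIES[best] never raises;
  -- getD's default is unreachable
  pvCategories.getD best "Software Tools"

-- ===== PRECONDITION & SPEC =====
def Spec_infer_sub_sector_py (profile : List (String × List (String × String))) (out : String) : Prop := out = infer_sub_sector_py_alt profile
instance (profile : List (String × List (String × String))) (out : String) : Decidable (Spec_infer_sub_sector_py profile out) := by unfold Spec_infer_sub_sector_py; infer_instance

-- ===== CLAIM =====
def Claim_equal_infer_sub_sector_py : Prop := ∀ (profile : List (String × List (String × String))), Dom_infer_sub_sector_py profile → Spec_infer_sub_sector_py profile (infer_sub_sector_py profile)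

-- ===== LEMMAS AND PROOFS =====

-- A pattern without c is an infix of `a ++ c :: b` iff it is an infix of a or of b.
theorem pv_infix_append_cons_iff {α : Type} {pat a b : List α} {c : α} (hc : c ∉ pat) :
    pat <:+: (a ++ c :: b) ↔ pat <:+: a ∨ pat <:+: b := by
  constructor
  · rintro ⟨s, t, h⟩
    rw [List.append_assoc] at h
    rcases List.append_eq_append_iff.mp h with ⟨as, ha, hrest⟩ | ⟨bs, hs, hcb⟩
    · rcases List.append_eq_append_iff.mp hrest with ⟨m, hm1, hm2⟩ | ⟨m, hm1, hm2⟩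
      · left; exact ⟨s, m, by rw [ha, hm1, List.append_assoc]⟩
      · cases m with
        | nil => left; simp at hm2; exact ⟨s, [], by simp [ha, hm1]⟩
        | cons x m' =>
          exfalso
          have hx : x = c := by simpa using (congrArg (·.head?) hm2.symm)
          exact hc (by rw [hm1, hx]; simp)
    · cases bs with
      | nil =>
        simp at hcb
        cases pat with
        | nil => left; exact List.nil_infix
        | cons p ps =>
          exfalso; apply hc
          have hcp : c = p := by simpa using congrArg (·.head?) hcb
          simp [hcp]
      | cons x bs' =>
        right
        have hb : b = bs' ++ (pat ++ t) := by simpa using congrArg (·.tail) hcb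
        exact ⟨bs', t, by rw [hb, List.append_assoc]⟩
  · rintro (⟨s, t, h⟩ | ⟨s, t, h⟩)
    · exact ⟨s, t ++ c :: b, by rw [← h]; simp⟩
    · exact ⟨a ++ c :: s, t, by rw [← h]; simp⟩

-- keyword membership in the lowered space-join of two fields splits per field
theorem pv_isIn_split (k s1 s2 : String) (hc : ' ' ∉ k.toList) :
    PySem.Str.isIn k (PySem.Str.lower (PySem.Str.join " " [s1, s2])) =
      (PySem.Str.isIn k (PySem.Str.lower s1) || PySem.Str.isIn k (PySem.Str.lower s2)) := by
  have hset : (PySem.Str.lower (PySem.Str.join " " [s1, s2])).toList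
      = (PySem.Str.lower s1).toList ++ ' ' :: (PySem.Str.lower s2).toList := by
    simp [PySem.Chars.join, PySem.Chars.lower, List.intercalate, List.intersperse]
    decide
  rw [Bool.eq_iff_iff]
  simp only [Bool.or_eq_true, PySem.Str.isIn_iff_infix, hset]
  exact pv_infix_append_cons_iff hc

theorem pv_join_singleton (s : String) : PySem.Str.join " " [s] = s := by
  apply String.toList_injective
  simp [PySem.Chars.join, List.intercalate]

-- ===== VERDICT =====
-- B's inner keyword fold, evaluated to a three-way conditional
theorem pv_inner_eval (low : String) (b : Nat) :
    pvKeywordPriority.foldl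
      (fun best kp => if decide (kp.2 < best) && PySem.Str.isIn kp.1 low then kp.2 else best) b
    = (if decide (0 < b) && (PySem.Str.isIn "productivity" low || PySem.Str.isIn "workspace" low
          || PySem.Str.isIn "note-taking" low) then 0
       else if decide (1 < b) && (PySem.Str.isIn "project" low || PySem.Str.isIn "knowledge" low) then 1
       else b) := by
  simp only [pvKeywordPriority, List.foldl_cons, List.foldl_nil]
  set m1 := PySem.Str.isIn "productivity" low with hm1
  set m2 := PySem.Str.isIn "workspace" low with hm2
  set m3 := PySem.Str.isIn "note-taking" low with hm3
  set m4 := PySem.Str.isIn "project" low with hm4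
  set m5 := PySem.Str.isIn "knowledge" low with hm5
  rcases b with _ | _ | n <;>
    cases m1 <;> cases m2 <;> cases m3 <;> cases m4 <;> cases m5 <;> rfl

-- ===== VERDICT =====
theorem infer_sub_sector_py_spec : Claim_equal_infer_sub_sector_py := by
  intro profile _
  unfold Spec_infer_sub_sector_py
  simp only [infer_sub_sector_py, infer_sub_sector_py_alt]
  generalize ((PySem.Dict.mk (match (PySem.Dict.mk profile).get? "snapshot" with
    | some d => if d = [] then [] else d
    | none => [])).get? "company_description") = o1
  generalize ((PySem.Dict.mk (match (PySem.Dict.mk profile).get? "strategy_and_direction" with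
    | some d => if d = [] then [] else d
    | none => [])).get? "mission_and_vision") = o2
  rcases o1 with _ | s1 <;> rcases o2 with _ | s2
  · rfl
  · by_cases h2 : s2 = ""
    · subst h2; rfl
    · simp only [List.filterMap_cons, List.filterMap_nil, List.foldl_cons, List.foldl_nil,
        if_neg h2, pv_join_singleton]
      rw [pv_inner_eval]
      set b1 := PySem.Str.isIn "productivity" (PySem.Str.lower s2) with hb1
      set b2 := PySem.Str.isIn "workspace" (PySem.Str.lower s2) with hb2
      set b3 := PySem.Str.isIn "note-taking" (PySem.Str.lower s2) with hb3
      set b4 := PySem.Str.isIn "project" (PySem.Str.lower s2) with hb4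
      set b5 := PySem.Str.isIn "knowledge" (PySem.Str.lower s2) with hb5
      cases b1 <;> cases b2 <;> cases b3 <;> cases b4 <;> cases b5 <;> rfl
  · by_cases h1 : s1 = ""
    · subst h1; rfl
    · simp only [List.filterMap_cons, List.filterMap_nil, List.foldl_cons, List.foldl_nil,
        if_neg h1, pv_join_singleton]
      rw [pv_inner_eval]
      set b1 := PySem.Str.isIn "productivity" (PySem.Str.lower s1) with hb1
      set b2 := PySem.Str.isIn "workspace" (PySem.Str.lower s1) with hb2
      set b3 := PySem.Str.isIn "note-taking" (PySem.Str.lower s1) with hb3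
      set b4 := PySem.Str.isIn "project" (PySem.Str.lower s1) with hb4
      set b5 := PySem.Str.isIn "knowledge" (PySem.Str.lower s1) with hb5
      cases b1 <;> cases b2 <;> cases b3 <;> cases b4 <;> cases b5 <;> rfl
  · by_cases h1 : s1 = "" <;> by_cases h2 : s2 = ""
    · subst h1; subst h2; rfl
    · subst h1
      simp only [List.filterMap_cons, List.filterMap_nil, List.foldl_cons, List.foldl_nil,
        if_neg h2, reduceIte, pv_join_singleton]
      rw [pv_inner_eval]
      set b1 := PySem.Str.isIn "productivity" (PySem.Str.lower s2) with hb1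
      set b2 := PySem.Str.isIn "workspace" (PySem.Str.lower s2) with hb2
      set b3 := PySem.Str.isIn "note-taking" (PySem.Str.lower s2) with hb3
      set b4 := PySem.Str.isIn "project" (PySem.Str.lower s2) with hb4
      set b5 := PySem.Str.isIn "knowledge" (PySem.Str.lower s2) with hb5
      cases b1 <;> cases b2 <;> cases b3 <;> cases b4 <;> cases b5 <;> rfl
    · subst h2
      simp only [List.filterMap_cons, List.filterMap_nil, List.foldl_cons, List.foldl_nil,
        if_neg h1, reduceIte, pv_join_singleton]
      rw [pv_inner_eval]
      set b1 := PySem.Str.isIn "productivity" (PySem.Str.lower s1) with hb1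
      set b2 := PySem.Str.isIn "workspace" (PySem.Str.lower s1) with hb2
      set b3 := PySem.Str.isIn "note-taking" (PySem.Str.lower s1) with hb3
      set b4 := PySem.Str.isIn "project" (PySem.Str.lower s1) with hb4
      set b5 := PySem.Str.isIn "knowledge" (PySem.Str.lower s1) with hb5
      cases b1 <;> cases b2 <;> cases b3 <;> cases b4 <;> cases b5 <;> rfl
    · simp only [List.filterMap_cons, List.filterMap_nil, List.foldl_cons, List.foldl_nil,
        if_neg h1, if_neg h2]
      rw [pv_inner_eval, pv_inner_eval]
      have e1 := pv_isIn_split "productivity" s1 s2 (by decide)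
      have e2 := pv_isIn_split "workspace" s1 s2 (by decide)
      have e3 := pv_isIn_split "note-taking" s1 s2 (by decide)
      have e4 := pv_isIn_split "project" s1 s2 (by decide)
      have e5 := pv_isIn_split "knowledge" s1 s2 (by decide)
      simp only [e1, e2, e3, e4, e5]
      set x1 := PySem.Str.isIn "productivity" (PySem.Str.lower s1) with hx1
      set x2 := PySem.Str.isIn "workspace" (PySem.Str.lower s1) with hx2
      set x3 := PySem.Str.isIn "note-taking" (PySem.Str.lower s1) with hx3
      set x4 := PySem.Str.isIn "project" (PySem.Str.lower s1) with hx4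
      set x5 := PySem.Str.isIn "knowledge" (PySem.Str.lower s1) with hx5
      set y1 := PySem.Str.isIn "productivity" (PySem.Str.lower s2) with hy1
      set y2 := PySem.Str.isIn "workspace" (PySem.Str.lower s2) with hy2
      set y3 := PySem.Str.isIn "note-taking" (PySem.Str.lower s2) with hy3
      set y4 := PySem.Str.isIn "project" (PySem.Str.lower s2) with hy4
      set y5 := PySem.Str.isIn "knowledge" (PySem.Str.lower s2) with hy5
      cases x1 <;> cases x2 <;> cases x3 <;> cases x4 <;> cases x5 <;>
        cases y1 <;> cases y2 <;> cases y3 <;> cases y4 <;> cases y5 <;> rfl
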